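-- pv_equiv track=rewrite | github.com/runningjarhead-tda/UALR_2023_Full_Run | interpret_pcs.py | find_demographic_features
-- ===== SOURCE A (Python) =====
-- def find_demographic_features(features_list, terms):
--     """Checks if any demographic terms are in the top features."""
--     found_features = []
--     for feature in features_list:
--         # Normalize feature name for robust checking
--         norm_feature = feature.upper().replace('_', '')
--         for term in terms:
--             if term in norm_feature:
--                 found_features.append(feature)
--                 break # Move to next feature once a term is found
--     return found_features
-- ===== SOURCE B (Python) =====
-- def find_demographic_features(features_list, terms):
--     """Checks if any demographic terms are in the top features.
--
--     Term-major re-implementation: normalize all features once, then sweep the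
--     term list, maintaining one boolean match flag per feature; finally keep
--     the features whose flag is set (original order preserved).
--     """
--     norms = [f.upper().replace('_', '') for f in features_list]
--     matched = [False] * len(features_list)
--     for term in terms:
--         matched = [m or term in n for m, n in zip(matched, norms)]
--     return [f for f, m in zip(features_list, matched) if m]
-- ===== Notes on version B (the rewrite author's own statement) =====
-- stated objective: alternative
-- what changed: B inverts the loop nesting: instead of scanning the term list per feature with an early break, it normalizes every feature once, sweeps the terms once each over a per-feature boolean match vector, and filters the features by their flags at the end.
import Mathlib
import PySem

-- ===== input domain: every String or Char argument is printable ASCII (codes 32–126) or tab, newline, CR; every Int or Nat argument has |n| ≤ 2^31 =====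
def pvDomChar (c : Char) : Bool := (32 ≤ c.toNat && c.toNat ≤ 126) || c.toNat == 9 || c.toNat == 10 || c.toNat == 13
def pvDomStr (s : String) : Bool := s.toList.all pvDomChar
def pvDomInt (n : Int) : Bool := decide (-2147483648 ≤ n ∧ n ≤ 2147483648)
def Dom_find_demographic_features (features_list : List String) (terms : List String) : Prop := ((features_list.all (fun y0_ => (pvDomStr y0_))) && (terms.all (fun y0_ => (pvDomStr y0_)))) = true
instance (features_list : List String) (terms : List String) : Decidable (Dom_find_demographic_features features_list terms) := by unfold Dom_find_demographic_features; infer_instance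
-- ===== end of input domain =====

-- B inverts the loop nesting of A (term-major sweep over match flags instead of
-- feature-major scan with early break); objective: alternative, same cost.

-- ===== PORT A =====
-- inner 'for term in terms: … break' loop of A
def findDemoInner (found : List String) (feature : String) (norm_feature : String) : List String → List String
  | [] => found
  | term :: rest =>
    if PySem.Str.isIn term norm_feature then found ++ [feature]
    else findDemoInner found feature norm_feature rest

def find_demographic_features (features_list : List String) (terms : List String) : List String :=
  features_list.foldl
    (fun found_features feature =>
      findDemoInner found_features feature
        (PySem.Str.replace (PySem.Str.upper feature) "_" "") terms)
    []

-- ===== PORT B =====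
def findDemoNorm (f : String) : String := PySem.Str.replace (PySem.Str.upper f) "_" ""

def find_demographic_features_alt (features_list : List String) (terms : List String) : List String :=
  let norms := features_list.map findDemoNorm
  let matched := terms.foldl
    (fun matched term => (matched.zip norms).map (fun p => p.1 || PySem.Str.isIn term p.2))
    (List.replicate features_list.length false)
  ((features_list.zip matched).filter (fun p => p.2)).map (fun p => p.1)

-- ===== PRECONDITION & SPEC =====
def Spec_find_demographic_features (features_list : List String) (terms : List String) (out : List String) : Prop := out = find_demographic_features_alt features_list terms
instance (features_list : List String) (terms : List String) (out : List String) : Decidable (Spec_find_demographic_features features_list terms out) := by unfold Spec_find_demographic_features; infer_instance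

-- ===== CLAIM (what is proved, stated in full; the proofs are below) =====
def Claim_equal_find_demographic_features : Prop := ∀ (features_list : List String) (terms : List String), Dom_find_demographic_features features_list terms → Spec_find_demographic_features features_list terms (find_demographic_features features_list terms)

-- ===== LEMMAS AND PROOFS =====

-- a feature matches iff some term occurs in its normalized name
def findDemoHit (terms : List String) (f : String) : Bool :=
  terms.any (fun t => PySem.Str.isIn t (findDemoNorm f))

-- A's inner loop appends the feature exactly when some term hits
theorem findDemoInner_eq (found : List String) (f norm : String) :
    forall ts, findDemoInner found f norm ts =
      if ts.any (fun t => PySem.Str.isIn t norm) then found ++ [f] else found := by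
  intro ts
  induction ts with
  | nil => simp [findDemoInner]
  | cons t rest ih =>
    simp only [findDemoInner, ih, List.any_cons]
    by_cases hp : PySem.Str.isIn t norm = true
    · simp only [hp, Bool.true_or]
      simp
    · simp only [Bool.not_eq_true] at hp
      simp only [hp, Bool.false_or]
      simp

-- A is the filter of the feature list by findDemoHit
theorem find_demographic_features_eq_filter (fl terms : List String) :
    find_demographic_features fl terms = fl.filter (findDemoHit terms) := by
  unfold find_demographic_features
  have h : forall acc, fl.foldl
      (fun found feature => findDemoInner found feature
        (PySem.Str.replace (PySem.Str.upper feature) "_" "") terms) acc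
      = acc ++ fl.filter (findDemoHit terms) := by
    induction fl with
    | nil => intro acc; simp
    | cons f rest ih =>
      intro acc
      rw [List.foldl_cons, findDemoInner_eq acc f _ terms,
          show (terms.any fun t => PySem.Str.isIn t (PySem.Str.replace (PySem.Str.upper f) "_" ""))
            = findDemoHit terms f from rfl]
      by_cases h : findDemoHit terms f = true
      · rw [if_pos h, ih, List.filter_cons_of_pos h]
        simp
      · rw [if_neg h, ih, List.filter_cons_of_neg h]
  simpa using h []

theorem zip_map_eq_zipWith {a b c : Type} (g : a -> b -> c) :
    forall (xs : List a) (ys : List b), (xs.zip ys).map (fun p => g p.1 p.2) = List.zipWith g xs ys := by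
  intro xs
  induction xs with
  | nil => intro ys; simp
  | cons x xs ih => intro ys; cases ys <;> simp [ih]

theorem zipWith_zipWith_right {a b c d : Type} (g : c -> b -> d) (h : a -> b -> c) :
    forall (xs : List a) (ys : List b),
      List.zipWith g (List.zipWith h xs ys) ys = List.zipWith (fun m n => g (h m n) n) xs ys := by
  intro xs
  induction xs with
  | nil => intro ys; simp
  | cons x xs ih => intro ys; cases ys <;> simp [ih]

theorem zipWith_const_left {a b : Type} :
    forall (xs : List a) (ys : List b), xs.length = ys.length ->
      List.zipWith (fun m _ => m) xs ys = xs := by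
  intro xs
  induction xs with
  | nil => intro ys _; simp
  | cons x xs ih =>
    intro ys h
    cases ys with
    | nil => simp at h
    | cons y ys => simp_all

theorem zipWith_replicate_left {a b c : Type} (k : a) (g : a -> b -> c) :
    forall (ys : List b), List.zipWith g (List.replicate ys.length k) ys = ys.map (g k) := by
  intro ys
  induction ys with
  | nil => simp
  | cons y ys ih => simp [List.replicate_succ, ih]

-- B's term fold computes the per-position disjunction over all terms
theorem findDemoFold_eq (norms : List String) :
    forall (ts : List String) (matched : List Bool), matched.length = norms.length ->
      ts.foldl (fun matched term => (matched.zip norms).map (fun p => p.1 || PySem.Str.isIn term p.2)) matched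
      = List.zipWith (fun m n => m || ts.any (fun t => PySem.Str.isIn t n)) matched norms := by
  intro ts
  induction ts with
  | nil =>
    intro matched h
    simp only [List.foldl_nil, List.any_nil, Bool.or_false]
    exact (zipWith_const_left matched norms h).symm
  | cons t rest ih =>
    intro matched h
    have hlen : ((matched.zip norms).map (fun p => p.1 || PySem.Str.isIn t p.2)).length = norms.length := by
      simp [h]
    rw [List.foldl_cons, ih _ hlen,
        zip_map_eq_zipWith (fun m n => m || PySem.Str.isIn t n) matched norms,
        zipWith_zipWith_right]
    simp only [List.any_cons, Bool.or_assoc]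

theorem filter_zip_map {a : Type} (q : a -> Bool) :
    forall (xs : List a), ((xs.zip (xs.map q)).filter (fun p => p.2)).map (fun p => p.1) = xs.filter q := by
  intro xs
  induction xs with
  | nil => simp
  | cons x xs ih => cases h : q x <;> simp [h, ih]

-- B is the same filter
theorem find_demographic_features_alt_eq_filter (fl terms : List String) :
    find_demographic_features_alt fl terms = fl.filter (findDemoHit terms) := by
  show ((fl.zip (terms.foldl
      (fun matched term => (matched.zip (fl.map findDemoNorm)).map
        (fun p => p.1 || PySem.Str.isIn term p.2))
      (List.replicate fl.length false))).filter (fun p => p.2)).map (fun p => p.1)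
    = fl.filter (findDemoHit terms)
  have hlen : (List.replicate fl.length false).length = (fl.map findDemoNorm).length := by simp
  rw [findDemoFold_eq _ _ _ hlen]
  rw [show List.replicate fl.length false = List.replicate (fl.map findDemoNorm).length false by simp]
  rw [zipWith_replicate_left]
  have : (fl.map findDemoNorm).map (fun n => false || terms.any fun t => PySem.Str.isIn t n)
      = fl.map (findDemoHit terms) := by
    rw [List.map_map]; rfl
  rw [this]
  exact filter_zip_map (findDemoHit terms) fl

-- ===== VERDICT (by name: the statement is the Claim_ definition above) =====
theorem find_demographic_features_spec : Claim_equal_find_demographic_features := by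
  intro fl terms _
  unfold Spec_find_demographic_features
  rw [find_demographic_features_eq_filter, find_demographic_features_alt_eq_filter]
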